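-- pv_equiv track=rewrite | github.com/cslammer/vibeathon-3-29-26 | paper_trader.py | _get_lessons
-- ===== SOURCE A (Python) =====
-- def _get_lessons(ledger):
--     """Return the most recent actionable lessons stored from resolved trades."""
--     lessons = []
--     for t in reversed(ledger["trades"]):
--         if t.get("lesson"):
--             lessons.append(t["lesson"])
--         if len(lessons) >= 5:
--             break
--     return lessons
-- ===== SOURCE B (Python) =====
-- def _get_lessons(ledger):
--     """Return the most recent actionable lessons stored from resolved trades."""
--     lessons = [t["lesson"] for t in ledger["trades"] if t.get("lesson")]
--     return lessons[-5:][::-1]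
-- ===== Notes on version B (the rewrite author's own statement) =====
-- stated objective: simpler
-- what changed: Replaces the reverse scan with early exit and an accumulator by a single forward filtering comprehension followed by slicing the last five lessons and reversing them.
import Mathlib
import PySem

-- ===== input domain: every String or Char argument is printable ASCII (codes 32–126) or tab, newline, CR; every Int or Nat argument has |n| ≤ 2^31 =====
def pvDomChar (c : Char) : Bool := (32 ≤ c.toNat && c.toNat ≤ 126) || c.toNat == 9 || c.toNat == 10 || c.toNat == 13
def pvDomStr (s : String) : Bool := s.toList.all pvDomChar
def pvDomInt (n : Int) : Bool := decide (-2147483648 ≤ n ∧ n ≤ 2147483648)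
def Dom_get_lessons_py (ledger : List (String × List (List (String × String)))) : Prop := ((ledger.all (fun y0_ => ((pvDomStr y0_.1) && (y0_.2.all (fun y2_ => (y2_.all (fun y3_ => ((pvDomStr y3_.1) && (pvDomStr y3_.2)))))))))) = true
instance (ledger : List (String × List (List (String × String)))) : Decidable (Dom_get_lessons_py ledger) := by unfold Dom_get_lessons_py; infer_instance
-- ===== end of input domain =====

-- B replaces A's reverse scan with early exit by a forward filtering comprehension
-- plus slicing the last five and reversing (objective: simpler).

-- ===== PORT A =====
-- 'for t in reversed(trades)' with the append / len>=5-break, as structural recursion over trades.reverse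
def pvLoopA : List (List (String × String)) → List String → List String
  | [], lessons => lessons
  | t :: rest, lessons =>
    let lessons' :=
      match (PySem.Dict.mk t).get? "lesson" with     -- t.get("lesson") truthy ⇔ some non-empty string
      | some s => if s = "" then lessons else lessons ++ [s]   -- lessons.append(t["lesson"])
      | none => lessons
    if lessons'.length ≥ 5 then lessons' else pvLoopA rest lessons'

def get_lessons_py (ledger : List (String × List (List (String × String)))) : List String :=
  match (PySem.Dict.mk ledger).get? "trades" with
  | some trades => pvLoopA trades.reverse []
  | none => []          -- ledger["trades"] raises KeyError here: excluded by Pre_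

-- ===== PORT B =====
def get_lessons_py_alt (ledger : List (String × List (List (String × String)))) : List String :=
  match (PySem.Dict.mk ledger).get? "trades" with
  | some trades =>
    let lessons := trades.filterMap (fun t =>
      match (PySem.Dict.mk t).get? "lesson" with
      | some s => if s = "" then none else some s
      | none => none)
    (PySem.List.slice lessons (some (-5)) none).reverse     -- lessons[-5:][::-1]
  | none => []          -- KeyError: excluded by Pre_

-- ===== PRECONDITION & SPEC =====
-- Pre_ excludes exactly the ledgers without a "trades" key, on which Python raises KeyError.
def Pre_get_lessons_py (ledger : List (String × List (List (String × String)))) : Prop :=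
  ((PySem.Dict.mk ledger).get? "trades").isSome = true
instance (ledger : List (String × List (List (String × String)))) : Decidable (Pre_get_lessons_py ledger) := by unfold Pre_get_lessons_py; infer_instance
def pvWitness_get_lessons_py : (List (String × List (List (String × String)))) :=
  [("trades", [[("lesson", "cut losses early")], [("lesson", "")]])]
def Spec_get_lessons_py (ledger : List (String × List (List (String × String)))) (out : List String) : Prop := out = get_lessons_py_alt ledger
instance (ledger : List (String × List (List (String × String)))) (out : List String) : Decidable (Spec_get_lessons_py ledger out) := by unfold Spec_get_lessons_py; infer_instance

-- ===== CLAIM (what is proved, stated in full; proofs below) =====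
def Claim_equal_get_lessons_py : Prop := ∀ (ledger : List (String × List (List (String × String)))), Dom_get_lessons_py ledger → Pre_get_lessons_py ledger → Spec_get_lessons_py ledger (get_lessons_py ledger)

-- ===== LEMMAS AND PROOFS =====

-- the lesson extracted from one trade
def pvLesson (t : List (String × String)) : Option String :=
  match (PySem.Dict.mk t).get? "lesson" with
  | some s => if s = "" then none else some s
  | none => none

-- A's loop collects the first (5 - |acc|) lessons of its remaining input, appended to acc.
theorem pvLoopA_eq (l : List (List (String × String))) :
    ∀ acc : List String, acc.length < 5 →
      pvLoopA l acc = acc ++ (l.filterMap pvLesson).take (5 - acc.length) := by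
  induction l with
  | nil => intro acc _; simp [pvLoopA]
  | cons t rest ih =>
    intro acc hacc
    rw [pvLoopA, List.filterMap_cons]
    cases h : (PySem.Dict.mk t).get? "lesson" with
    | none =>
      have hl : pvLesson t = none := by simp [pvLesson, h]
      simp only [hl]
      have : ¬ acc.length ≥ 5 := by omega
      simp only [this, if_false]
      exact ih acc hacc
    | some s =>
      by_cases hs : s = ""
      · have hl : pvLesson t = none := by simp [pvLesson, h, hs]
        simp only [hl, hs, if_true]
        have hlt : ¬ acc.length ≥ 5 := by omega
        rw [if_neg hlt]
        exact ih acc hacc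
      · have hl : pvLesson t = some s := by simp [pvLesson, h, hs]
        simp only [hl, if_neg hs]
        by_cases h5 : (acc ++ [s]).length ≥ 5
        · have hlen : acc.length = 4 := by simp at h5; omega
          simp only [if_pos h5, hlen]
          simp
        · simp only [if_neg h5]
          rw [ih (acc ++ [s]) (by simp at h5 ⊢; omega)]
          have heq : 5 - acc.length = (5 - (acc ++ [s]).length) + 1 := by
            simp at h5 ⊢; omega
          rw [heq, List.take_succ_cons]
          simp

theorem get_lessons_py_spec : Claim_equal_get_lessons_py := by
  intro ledger _ hpre
  unfold Spec_get_lessons_py get_lessons_py get_lessons_py_alt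
  unfold Pre_get_lessons_py at hpre
  cases h : (PySem.Dict.mk ledger).get? "trades" with
  | none => rw [h] at hpre
  | some trades =>
    simp only
    rw [pvLoopA_eq trades.reverse [] (by simp)]
    rw [PySem.List.slice_from_neg_ofNat _ 5 (by omega)]
    have hfm : (trades.filterMap (fun t =>
        match (PySem.Dict.mk t).get? "lesson" with
        | some s => if s = "" then none else some s
        | none => none)) = trades.filterMap pvLesson := rfl
    rw [hfm, List.filterMap_reverse, List.take_reverse]
    simp
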